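-- pv_equiv track=rewrite | github.com/Ssebi1/Advent-of-code | Day 3/day_3_part_2.py | get_number_index
-- ===== SOURCE A (Python) =====
-- def get_number_index(line, line_index, char_index, numbers):
--     number_index = -1
--     number_found = False
--     for j, char in enumerate(line):
--         if char.isdigit():
--             if not number_found:
--                 number_index += 1
--                 number_found = True
--         else:
--             number_found = False
--         if j == char_index:
--             return numbers[line_index][number_index]
--     return None
-- ===== SOURCE B (Python) =====
-- def get_number_index(line, line_index, char_index, numbers):
--     if not 0 <= char_index < len(line):
--         return None
--     # index of run-start positions, built once
--     starts = [j for j in range(len(line))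
--               if line[j].isdigit() and (j == 0 or not line[j - 1].isdigit())]
--     # binary search: lo = number of run starts at or before char_index
--     lo, hi = 0, len(starts)
--     while lo < hi:
--         mid = (lo + hi) // 2
--         if starts[mid] <= char_index:
--             lo = mid + 1
--         else:
--             hi = mid
--     return numbers[line_index][lo - 1]
-- ===== Notes on version B (the rewrite author's own statement) =====
-- stated objective: alternative
-- what changed: A's single stateful scan with a number_found flag and an early return is replaced by a staged index-plus-search design: first build the list of digit-run start positions, then binary-search it (hand-rolled bisect_right) for char_index and do one lookup numbers[line_index][lo-1].
import Mathlib
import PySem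

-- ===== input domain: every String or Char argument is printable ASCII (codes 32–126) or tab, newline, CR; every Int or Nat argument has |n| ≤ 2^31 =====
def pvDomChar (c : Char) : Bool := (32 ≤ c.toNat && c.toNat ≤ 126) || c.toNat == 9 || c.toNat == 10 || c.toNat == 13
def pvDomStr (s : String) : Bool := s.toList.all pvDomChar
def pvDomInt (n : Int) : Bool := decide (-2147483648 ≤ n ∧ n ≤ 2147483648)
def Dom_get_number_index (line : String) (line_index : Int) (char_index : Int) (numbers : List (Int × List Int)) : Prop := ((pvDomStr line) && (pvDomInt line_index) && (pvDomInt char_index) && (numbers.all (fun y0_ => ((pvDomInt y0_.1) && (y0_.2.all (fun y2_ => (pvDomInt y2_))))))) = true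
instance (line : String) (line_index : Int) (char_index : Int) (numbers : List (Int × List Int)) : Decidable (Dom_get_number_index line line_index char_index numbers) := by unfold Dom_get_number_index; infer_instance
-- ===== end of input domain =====

-- B replaces A's single stateful flag-scan with early return by a staged design: build the list of
-- digit-run start positions once, then binary-search it for char_index and do one lookup (alternative; same cost).

-- ===== PORT A =====
-- the early-returning for-loop of A: state = (number_index, number_found)
def pvLoopA (line_index char_index : Int) (numbers : List (Int × List Int)) :
    List (Int × Char) → Int → Bool → Option Int
  | [], _, _ => none
  | (j, c) :: rest, ni, nf =>
    let st : Int × Bool :=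
      if PySem.Chars.isdigit c then (if !nf then (ni + 1, true) else (ni, nf))
      else (ni, false)
    if j = char_index then
      ((PySem.Dict.mk numbers).get? line_index).bind (fun sub => PySem.List.pyGet? sub st.1)
    else
      pvLoopA line_index char_index numbers rest st.1 st.2

def get_number_index (line : String) (line_index : Int) (char_index : Int) (numbers : List (Int × List Int)) : Option Int :=
  pvLoopA line_index char_index numbers (PySem.List.enumerate line.toList) (-1) false

-- ===== PORT B =====
-- 'line[j].isdigit() and (j == 0 or not line[j-1].isdigit())'; the ' ' defaults are never used
-- (j is drawn from range(len(line))), they only make the Python-exact pyGet? total here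
def pvIsStart (cs : List Char) (j : Int) : Bool :=
  PySem.Chars.isdigit ((PySem.List.pyGet? cs j).getD ' ') &&
    (j == 0 || !PySem.Chars.isdigit ((PySem.List.pyGet? cs (j - 1)).getD ' '))

-- 'starts = [j for j in range(len(line)) if …]'
def pvStarts (cs : List Char) : List Int :=
  (PySem.List.pyRange 0 cs.length 1).filter (pvIsStart cs)

-- the while-loop of B's hand-rolled bisect_right (lo, hi are nonnegative throughout in Python)
def pvBisect (starts : List Int) (x : Int) (lo hi : Nat) : Nat :=
  if _h : lo < hi then
    let mid := (lo + hi) / 2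
    if (PySem.List.pyGet? starts (mid : Int)).getD 0 ≤ x then pvBisect starts x (mid + 1) hi
    else pvBisect starts x lo mid
  else lo
termination_by hi - lo
decreasing_by all_goals omega

def get_number_index_alt (line : String) (line_index : Int) (char_index : Int) (numbers : List (Int × List Int)) : Option Int :=
  if 0 ≤ char_index ∧ char_index < (line.toList.length : Int) then
    let starts := pvStarts line.toList
    let lo := pvBisect starts char_index 0 starts.length
    ((PySem.Dict.mk numbers).get? line_index).bind (fun sub => PySem.List.pyGet? sub ((lo : Int) - 1))
  else none

-- ===== PRECONDITION & SPEC =====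
-- number of digit-run starts in cs (flag = previous char was a digit); used only to state Pre_
def pvRunsAll : Bool → List Char → Nat
  | _, [] => 0
  | nf, c :: cs => (if PySem.Chars.isdigit c && !nf then 1 else 0) + pvRunsAll (PySem.Chars.isdigit c) cs

def pvPreAux : Option (List Int) → Nat → Bool
  | none, _ => false
  | some sub, r => decide (1 ≤ sub.length ∧ r ≤ sub.length)

-- Pre_ excludes exactly the inputs where Python A raises: char_index in range but line_index not a key
-- of numbers (KeyError) or the run index out of range for numbers[line_index] (IndexError).
def Pre_get_number_index (line : String) (line_index : Int) (char_index : Int) (numbers : List (Int × List Int)) : Prop :=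
  (0 ≤ char_index ∧ char_index < (line.toList.length : Int)) →
    pvPreAux ((PySem.Dict.mk numbers).get? line_index)
      (pvRunsAll false (line.toList.take (char_index.toNat + 1))) = true
instance (line : String) (line_index : Int) (char_index : Int) (numbers : List (Int × List Int)) : Decidable (Pre_get_number_index line line_index char_index numbers) := by unfold Pre_get_number_index; infer_instance

def pvWitness_get_number_index : String × Int × Int × (List (Int × List Int)) := ("a12 b", 0, 2, [(0, [7])])

def Spec_get_number_index (line : String) (line_index : Int) (char_index : Int) (numbers : List (Int × List Int)) (out : Option Int) : Prop := out = get_number_index_alt line line_index char_index numbers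
instance (line : String) (line_index : Int) (char_index : Int) (numbers : List (Int × List Int)) (out : Option Int) : Decidable (Spec_get_number_index line line_index char_index numbers out) := by unfold Spec_get_number_index; infer_instance

-- ===== CLAIM (what is proved, stated in full; the proofs are below) =====
def Claim_equal_get_number_index : Prop := ∀ (line : String) (line_index : Int) (char_index : Int) (numbers : List (Int × List Int)), Dom_get_number_index line line_index char_index numbers → Pre_get_number_index line line_index char_index numbers → Spec_get_number_index line line_index char_index numbers (get_number_index line line_index char_index numbers)

-- ===== LEMMAS AND PROOFS =====

def pvLookup (line_index : Int) (numbers : List (Int × List Int)) (i : Int) : Option Int :=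
  ((PySem.Dict.mk numbers).get? line_index).bind (fun sub => PySem.List.pyGet? sub i)

lemma pvLoopA_spec (line_index char_index : Int) (numbers : List (Int × List Int)) :
    ∀ (cs : List Char) (j : Nat) (ni : Int) (nf : Bool),
      pvLoopA line_index char_index numbers (PySem.List.enumerate cs (j : Int)) ni nf =
        if (j : Int) ≤ char_index ∧ char_index < (j : Int) + cs.length then
          pvLookup line_index numbers
            (ni + (pvRunsAll nf (cs.take ((char_index - j).toNat + 1)) : Int))
        else none := by
  intro cs
  induction cs with
  | nil =>
    intro j ni nf
    simp [PySem.List.enumerate, pvLoopA]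
  | cons c rest ih =>
    intro j ni nf
    rw [PySem.List.enumerate_cons, pvLoopA]
    by_cases hj : (j : Int) = char_index
    · have hcond : (j : Int) ≤ char_index ∧ char_index < (j : Int) + (((c :: rest).length : Nat) : Int) := by
        refine ⟨le_of_eq hj, ?_⟩
        simp only [List.length_cons]
        push_cast
        omega
      have hk : (char_index - (j : Int)).toNat = 0 := by omega
      rw [if_pos hj, if_pos hcond, hk]
      cases hd : PySem.Chars.isdigit c <;> cases nf <;>
        simp [pvRunsAll, pvLookup, hd]
    · rw [if_neg hj]
      have hcast : ((j : Int) + 1) = ((j + 1 : Nat) : Int) := by push_cast; ring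
      rw [hcast, ih (j + 1)]
      by_cases hin : ((j + 1 : Nat) : Int) ≤ char_index ∧ char_index < ((j + 1 : Nat) : Int) + (rest.length : Int)
      · obtain ⟨h1, h2⟩ := hin
        rw [if_pos ⟨h1, h2⟩]
        have hcond : (j : Int) ≤ char_index ∧ char_index < (j : Int) + (((c :: rest).length : Nat) : Int) := by
          refine ⟨by push_cast at h1; omega, ?_⟩
          simp only [List.length_cons]
          push_cast at h2 ⊢
          omega
        rw [if_pos hcond]
        have hk : (char_index - (j : Int)).toNat = (char_index - ((j + 1 : Nat) : Int)).toNat + 1 := by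
          push_cast at h1 ⊢
          omega
        rw [hk, List.take_succ_cons]
        cases hd : PySem.Chars.isdigit c <;> cases nf <;>
          · simp only [hd, pvRunsAll, Bool.not_false, Bool.not_true, Bool.and_false,
              Bool.and_true, Bool.false_eq_true, if_true, if_false]
            congr 1
            push_cast
            ring
      · rw [if_neg hin, if_neg (fun hc => hin (by
          simp only [List.length_cons] at hc
          push_cast at hc ⊢
          omega))]

-- prefix characterization of '≤ x' in a (≤)-sorted list: exactly the first countP elements satisfy it
lemma pvSorted_le_iff (l : List Int) (x : Int) (hs : l.Pairwise (· ≤ ·)) :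
    ∀ (i : Nat) (hi : i < l.length), (l[i] ≤ x ↔ i < l.countP (fun v => decide (v ≤ x))) := by
  induction l with
  | nil => intro i hi; simp at hi
  | cons a t ih =>
    intro i hi
    rw [List.pairwise_cons] at hs
    rw [List.countP_cons]
    by_cases ha : a ≤ x
    · simp only [ha, decide_true, if_true]
      cases i with
      | zero =>
        simp only [List.getElem_cons_zero]
        exact ⟨fun _ => by omega, fun _ => ha⟩
      | succ k =>
        simp only [List.getElem_cons_succ]
        rw [ih hs.2 k (by simpa using hi)]
        omega
    · have ht0 : t.countP (fun v => decide (v ≤ x)) = 0 := by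
        rw [List.countP_eq_zero]
        intro v hv
        simp only [decide_eq_true_eq]
        exact fun hvx => ha (le_trans (hs.1 v hv) hvx)
      have hrhs : t.countP (fun v => decide (v ≤ x)) + (if decide (a ≤ x) = true then 1 else 0) = 0 := by
        simp [ht0, ha]
      rw [hrhs]
      simp only [Nat.not_lt_zero, iff_false]
      cases i with
      | zero => simpa using ha
      | succ k =>
        simp only [List.getElem_cons_succ]
        exact fun h => ha (le_trans (hs.1 _ (List.getElem_mem _)) h)

-- correctness of B's hand-rolled bisect loop on a (≤)-sorted list
lemma pvBisect_spec (starts : List Int) (x : Int) (hs : starts.Pairwise (· ≤ ·)) :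
    ∀ (lo hi : Nat), lo ≤ starts.countP (fun v => decide (v ≤ x)) →
      starts.countP (fun v => decide (v ≤ x)) ≤ hi → hi ≤ starts.length →
      pvBisect starts x lo hi = starts.countP (fun v => decide (v ≤ x)) := by
  intro lo hi
  induction lo, hi using pvBisect.induct starts x with
  | case1 lo hi h mid hle ih =>
    intro hlo hhi hlen
    rw [pvBisect, dif_pos h, if_pos (by simpa [mid] using hle)]
    have hmidlt : mid < starts.length := by omega
    have := (pvSorted_le_iff starts x hs mid hmidlt).1
      (by simpa [PySem.List.pyGet?_natCast, List.getElem?_eq_getElem hmidlt] using hle)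
    exact ih (by omega) hhi hlen
  | case2 lo hi h mid hgt ih =>
    intro hlo hhi hlen
    rw [pvBisect, dif_pos h, if_neg (by simpa [mid] using hgt)]
    have hmidlt : mid < starts.length := by omega
    have : ¬ starts[mid] ≤ x := by
      simpa [PySem.List.pyGet?_natCast, List.getElem?_eq_getElem hmidlt] using hgt
    have hcnt : starts.countP (fun v => decide (v ≤ x)) ≤ mid := by
      by_contra hc
      exact this ((pvSorted_le_iff starts x hs mid hmidlt).2 (by omega))
    exact ih hlo hcnt (by omega)
  | case3 lo hi h =>
    intro hlo hhi _
    rw [pvBisect, dif_neg h]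
    omega

-- flag after processing l (the last char's digit-ness, or nf if l is empty)
def pvLastD : Bool → List Char → Bool
  | nf, [] => nf
  | _, c :: cs => pvLastD (PySem.Chars.isdigit c) cs

lemma pvLastD_append_singleton (c : Char) :
    ∀ (l : List Char) (nf : Bool), pvLastD nf (l ++ [c]) = PySem.Chars.isdigit c := by
  intro l
  induction l with
  | nil => intro nf; rfl
  | cons a t ih => intro nf; exact ih _

lemma pvRunsAll_append_singleton (c : Char) :
    ∀ (l : List Char) (nf : Bool),
      pvRunsAll nf (l ++ [c]) =
        pvRunsAll nf l + (if PySem.Chars.isdigit c && !pvLastD nf l then 1 else 0) := by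
  intro l
  induction l with
  | nil => intro nf; simp [pvRunsAll, pvLastD]
  | cons a t ih =>
    intro nf
    have hL : pvLastD nf (a :: t) = pvLastD (PySem.Chars.isdigit a) t := rfl
    simp only [List.cons_append, pvRunsAll, ih (PySem.Chars.isdigit a), hL]
    split_ifs <;> omega

-- run starts among the first M characters = run count of the length-M prefix
lemma pvStarts_count_take (cs : List Char) :
    ∀ (M : Nat), M ≤ cs.length →
      (List.range M).countP (fun m : Nat => pvIsStart cs ((m : Nat) : Int)) = pvRunsAll false (cs.take M) := by
  intro M
  induction M with
  | zero => intro _; simp [pvRunsAll]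
  | succ k ih =>
    intro hM
    have hk : k < cs.length := by omega
    rw [List.range_succ, List.countP_append, ih (by omega)]
    rw [List.take_add_one, List.getElem?_eq_getElem hk]
    simp only [Option.toList_some]
    rw [pvRunsAll_append_singleton]
    have harg : pvIsStart cs (k : Int) =
        (PySem.Chars.isdigit cs[k] && !pvLastD false (cs.take k)) := by
      unfold pvIsStart
      rw [PySem.List.pyGet?_natCast, List.getElem?_eq_getElem hk]
      cases k with
      | zero => simp [pvLastD]
      | succ k' =>
        have hk' : k' < cs.length := by omega
        have h1 : ((k' + 1 : Nat) : Int) - 1 = ((k' : Nat) : Int) := by push_cast; ring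
        rw [h1, PySem.List.pyGet?_natCast, List.getElem?_eq_getElem hk']
        have h2 : pvLastD false (cs.take (k' + 1)) = PySem.Chars.isdigit cs[k'] := by
          rw [List.take_add_one, List.getElem?_eq_getElem hk']
          simp only [Option.toList_some]
          exact pvLastD_append_singleton _ _ _
        have h3 : (((k' : Int) + 1) == 0) = false := by
          rw [beq_eq_false_iff_ne]
          omega
        rw [h2]
        push_cast
        rw [h3]
        simp
    simp [harg]

-- the count of run starts at positions ≤ char_index equals the run count of the prefix
lemma pvStarts_countP (cs : List Char) (ci : Int) (h0 : 0 ≤ ci) (hn : ci < (cs.length : Int)) :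
    (pvStarts cs).countP (fun v => decide (v ≤ ci)) =
      pvRunsAll false (cs.take (ci.toNat + 1)) := by
  unfold pvStarts
  rw [List.countP_filter]
  rw [PySem.List.pyRange_one]
  simp only [sub_zero, Int.toNat_natCast, List.countP_map, zero_add]
  have hsplit : cs.length = (ci.toNat + 1) + (cs.length - (ci.toNat + 1)) := by omega
  rw [hsplit, List.range_add, List.countP_append]
  have h2 : ((List.range (cs.length - (ci.toNat + 1))).map (fun k => ci.toNat + 1 + k)).countP
      ((fun v => decide (v ≤ ci) && pvIsStart cs v) ∘ fun k => ((k : Nat) : Int)) = 0 := by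
    rw [List.countP_eq_zero]
    intro m hm
    simp only [List.mem_map] at hm
    obtain ⟨k, _, rfl⟩ := hm
    simp only [Function.comp_apply, Bool.and_eq_true, decide_eq_true_eq]
    rintro ⟨hle, -⟩
    omega
  rw [h2, Nat.add_zero]
  rw [← pvStarts_count_take cs (ci.toNat + 1) (by omega)]
  apply List.countP_congr
  intro m hm
  simp only [List.mem_range] at hm
  simp only [Function.comp_apply]
  have : ((m : Nat) : Int) ≤ ci := by omega
  simp [this]

lemma pvStarts_sorted (cs : List Char) : (pvStarts cs).Pairwise (· ≤ ·) := by
  unfold pvStarts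
  exact ((PySem.List.pairwise_lt_pyRange_one 0 (cs.length : Int)).filter _).imp le_of_lt

-- ===== VERDICT (by name: the statement is the Claim_ definition above) =====
theorem get_number_index_spec : Claim_equal_get_number_index := by
  unfold Claim_equal_get_number_index Spec_get_number_index
  intro line line_index char_index numbers _ _
  unfold get_number_index get_number_index_alt
  have hA := pvLoopA_spec line_index char_index numbers line.toList 0 (-1) false
  simp only [Nat.cast_zero, zero_add, sub_zero] at hA
  rw [hA]
  by_cases h : 0 ≤ char_index ∧ char_index < (line.toList.length : Int)
  · rw [if_pos h, if_pos h]
    have hb := pvBisect_spec (pvStarts line.toList) char_index (pvStarts_sorted line.toList)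
      0 (pvStarts line.toList).length (by omega) List.countP_le_length le_rfl
    show pvLookup line_index numbers
        (-1 + (pvRunsAll false (line.toList.take (char_index.toNat + 1)) : Int)) =
      ((PySem.Dict.mk numbers).get? line_index).bind (fun sub =>
        PySem.List.pyGet? sub
          ((pvBisect (pvStarts line.toList) char_index 0 (pvStarts line.toList).length : Int) - 1))
    rw [hb, pvStarts_countP line.toList char_index h.1 h.2]
    unfold pvLookup
    rw [show (-1 : Int) + (pvRunsAll false (line.toList.take (char_index.toNat + 1)) : Int) =
        (pvRunsAll false (line.toList.take (char_index.toNat + 1)) : Int) - 1 from by omega]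
  · rw [if_neg h, if_neg h]
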